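-- pv_equiv track=rewrite | github.com/freedomcondor/mns3.0 | src/scripts/drawData.py | transferTimeDataToRunSetData
-- ===== SOURCE A (Python) =====
-- def transferTimeDataToRunSetData(runsData, step_length = 1, interval_steps = False) :
-- 	stepsdata = []
-- 	positions = []
-- 	# for each run
-- 	for runData in runsData :
-- 		step_count = 0
-- 		# for each step of this run
-- 		for i in range(0, len(runData)) :
-- 			# if a right step by step_length
-- 			if i % step_length == 0 :
-- 				if len(stepsdata) <= step_count:
-- 					stepsdata.append([])
-- 					positions.append(i)
-- 				stepsdata[step_count].append(runData[i])
-- 				step_count = step_count + 1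
-- 			# if count interval steps
-- 			if interval_steps == True:
-- 				stepsdata[step_count-1].append(runData[i])
--
-- 	return stepsdata, positions
-- ===== SOURCE B (Python) =====
-- def transferTimeDataToRunSetData(runsData, step_length = 1, interval_steps = False):
--     max_len = max((len(r) for r in runsData), default=0)
--     positions = [i for i in range(max_len) if i % step_length == 0]
--     stepsdata = [[] for _ in positions]
--     for run in runsData:
--         for k, p in enumerate(positions):
--             if p < len(run):
--                 bucket = stepsdata[k]
--                 bucket.append(run[p])
--                 if interval_steps:
--                     end = positions[k + 1] if k + 1 < len(positions) else len(run)
--                     bucket.extend(run[p:end])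
--     return stepsdata, positions
-- ===== Notes on version B (the rewrite author's own statement) =====
-- stated objective: alternative
-- what changed: B replaces A's single interleaved scan with on-demand bucket growth and a running step counter by a two-phase decomposition: it first computes max_len and the table of sampled positions once, allocates all buckets up front, and then fills each bucket per run with one indexed append plus one slice for the interval extension, instead of A's element-by-element inner loop over every step.
import Mathlib
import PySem

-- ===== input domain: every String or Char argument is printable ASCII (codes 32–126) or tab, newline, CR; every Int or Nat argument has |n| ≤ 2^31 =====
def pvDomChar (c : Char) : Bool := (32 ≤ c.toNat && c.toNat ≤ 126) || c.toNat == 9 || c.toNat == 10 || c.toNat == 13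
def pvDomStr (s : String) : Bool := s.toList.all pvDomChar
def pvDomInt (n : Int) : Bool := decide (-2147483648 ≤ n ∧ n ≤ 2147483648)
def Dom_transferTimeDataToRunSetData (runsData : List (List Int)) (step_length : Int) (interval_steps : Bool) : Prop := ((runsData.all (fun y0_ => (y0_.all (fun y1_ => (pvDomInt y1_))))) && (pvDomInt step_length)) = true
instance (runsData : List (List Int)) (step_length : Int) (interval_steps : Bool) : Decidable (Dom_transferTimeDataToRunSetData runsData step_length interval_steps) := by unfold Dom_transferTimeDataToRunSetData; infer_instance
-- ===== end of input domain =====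

-- B recasts A's interleaved scan (on-demand bucket growth + step counter) as a two-phase
-- decomposition: precompute the position table, allocate all buckets, then fill per run
-- with one append plus a slice (objective: alternative; same asymptotic cost).


-- ===== PORT A =====
-- one iteration of A's inner 'for i in range(0, len(runData))' body
def pvAStep (step_length : Int) (interval_steps : Bool) (runData : List Int)
    (st : (List (List Int) × List Int) × Int) (i : Int) : (List (List Int) × List Int) × Int :=
  let sd := st.1.1
  let pos := st.1.2
  let sc := st.2
  let st1 :=
    if PySem.Int.mod i step_length = 0 then
      let sd' := if (sd.length : Int) ≤ sc then sd ++ [[]] else sd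
      let pos' := if (sd.length : Int) ≤ sc then pos ++ [i] else pos
      ((sd'.modify sc.toNat (fun b => b ++ [PySem.List.pyGetD runData i 0]), pos'), sc + 1)
    else ((sd, pos), sc)
  if interval_steps then
    ((st1.1.1.modify (st1.2 - 1).toNat (fun b => b ++ [PySem.List.pyGetD runData i 0]), st1.1.2), st1.2)
  else st1

def transferTimeDataToRunSetData (runsData : List (List Int)) (step_length : Int) (interval_steps : Bool) : List (List Int) × List Int :=
  runsData.foldl
    (fun acc runData =>
      ((PySem.List.pyRange 0 (runData.length : Int) 1).foldl
        (pvAStep step_length interval_steps runData) (acc, 0)).1)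
    (([] : List (List Int)), ([] : List Int))

-- ===== PORT B =====
-- one iteration of B's inner 'for k, p in enumerate(positions)' body
def pvBStep (interval_steps : Bool) (positions : List Int) (run : List Int)
    (sd : List (List Int)) (kp : Int × Int) : List (List Int) :=
  if kp.2 < (run.length : Int) then
    sd.modify kp.1.toNat (fun b =>
      if interval_steps then
        (b ++ [PySem.List.pyGetD run kp.2 0]) ++
          PySem.List.slice run (some kp.2)
            (some (if kp.1 + 1 < (positions.length : Int) then PySem.List.pyGetD positions (kp.1 + 1) 0
                   else (run.length : Int)))
      else b ++ [PySem.List.pyGetD run kp.2 0])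
  else sd

def transferTimeDataToRunSetData_alt (runsData : List (List Int)) (step_length : Int) (interval_steps : Bool) : List (List Int) × List Int :=
  let maxLen : Nat := runsData.foldl (fun m r => max m r.length) 0
  let positions := (PySem.List.pyRange 0 (maxLen : Int) 1).filter (fun i => PySem.Int.mod i step_length == 0)
  let init := positions.map (fun _ => ([] : List Int))
  let stepsdata := runsData.foldl
    (fun sd run => (PySem.List.enumerate positions 0).foldl (pvBStep interval_steps positions run) sd)
    init
  (stepsdata, positions)

-- ===== PRECONDITION & SPEC =====
-- Pre_ excludes exactly the inputs where Python A raises ZeroDivisionError: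
-- step_length == 0 together with at least one non-empty run (the modulo is then evaluated).
def Pre_transferTimeDataToRunSetData (runsData : List (List Int)) (step_length : Int) (interval_steps : Bool) : Prop :=
  step_length ≠ 0 ∨ ∀ r ∈ runsData, r = []
instance (runsData : List (List Int)) (step_length : Int) (interval_steps : Bool) : Decidable (Pre_transferTimeDataToRunSetData runsData step_length interval_steps) := by unfold Pre_transferTimeDataToRunSetData; infer_instance
def pvWitness_transferTimeDataToRunSetData : List (List Int) × Int × Bool := ([[1, 2, 3], [4]], 2, true)

def Spec_transferTimeDataToRunSetData (runsData : List (List Int)) (step_length : Int) (interval_steps : Bool) (out : List (List Int) × List Int) : Prop := out = transferTimeDataToRunSetData_alt runsData step_length interval_steps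
instance (runsData : List (List Int)) (step_length : Int) (interval_steps : Bool) (out : List (List Int) × List Int) : Decidable (Spec_transferTimeDataToRunSetData runsData step_length interval_steps out) := by unfold Spec_transferTimeDataToRunSetData; infer_instance

-- ===== CLAIM (what is proved, stated in full; the proofs are below) =====
def Claim_equal_transferTimeDataToRunSetData : Prop := ∀ (runsData : List (List Int)) (step_length : Int) (interval_steps : Bool), Dom_transferTimeDataToRunSetData runsData step_length interval_steps → Pre_transferTimeDataToRunSetData runsData step_length interval_steps → Spec_transferTimeDataToRunSetData runsData step_length interval_steps (transferTimeDataToRunSetData runsData step_length interval_steps)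

-- ===== LEMMAS AND PROOFS =====

-- number of multiples of D in [0, t)
def pvNb (D : Nat) : Nat → Nat
  | 0 => 0
  | (M + 1) => pvNb D M + (if D ∣ M then 1 else 0)

-- the position table: [0, D, 2D, …] (n entries)
def pvPos (D n : Nat) : List Int := (List.range n).map (fun k => ((k * D : Nat) : Int))

-- what one run contributes to bucket k
def pvContrib (D : Nat) (iv : Bool) (r : List Int) (k : Nat) : List Int :=
  if k * D < r.length then
    [r.getD (k * D) 0] ++ (if iv then (r.drop (k * D)).take D else [])
  else []

-- partial contribution after the first t steps of a run (A's inner loop truncated at t)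
def pvContribP (D : Nat) (iv : Bool) (r : List Int) (k t : Nat) : List Int :=
  if k * D < t then
    [r.getD (k * D) 0] ++ (if iv then (r.drop (k * D)).take (min D (t - k * D)) else [])
  else []

def pvPad (m : Nat) (sd : List (List Int)) : List (List Int) :=
  sd ++ List.replicate (m - sd.length) ([] : List Int)

def pvMaxLen (runs : List (List Int)) : Nat := runs.foldl (fun m r => max m r.length) 0

lemma pvNb_bounds (D : Nat) (hD : 0 < D) (M : Nat) : M ≤ pvNb D M * D ∧ pvNb D M * D < M + D := by
  induction M with
  | zero => simp [pvNb]; omega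
  | succ M ih =>
    rcases ih with ⟨h1, h2⟩
    by_cases h : D ∣ M
    · rcases h with ⟨q, rfl⟩
      have hq : pvNb D (D * q) = q := by
        have hq1 : q ≤ pvNb D (D * q) :=
          Nat.le_of_mul_le_mul_left
            (by rw [Nat.mul_comm D (pvNb D (D * q))]; exact h1) hD
        have hq2 : pvNb D (D * q) < q + 1 :=
          Nat.lt_of_mul_lt_mul_right
            (by rw [Nat.add_mul, Nat.one_mul, Nat.mul_comm q D]; exact h2)
        omega
      have hpv : pvNb D (D * q + 1) = q + 1 := by
        simp [pvNb, hq, Dvd.intro q rfl]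
      have e1 : (q + 1) * D = D * q + D := by
        rw [Nat.add_mul, Nat.one_mul, Nat.mul_comm q D]
      rw [hpv, e1]; omega
    · have hMne : M ≠ pvNb D M * D := fun he => h ⟨pvNb D M, he.trans (Nat.mul_comm _ _)⟩
      have : pvNb D (M + 1) = pvNb D M := by simp [pvNb, h]
      rw [this]; omega

lemma pvNb_mul_of_dvd (D : Nat) (hD : 0 < D) (M : Nat) (h : D ∣ M) : M = pvNb D M * D := by
  rcases pvNb_bounds D hD M with ⟨h1, h2⟩
  rcases h with ⟨q, rfl⟩
  have hq1 : q ≤ pvNb D (D * q) :=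
    Nat.le_of_mul_le_mul_left
      (by rw [Nat.mul_comm D (pvNb D (D * q))]; exact h1) hD
  have hq2 : pvNb D (D * q) < q + 1 :=
    Nat.lt_of_mul_lt_mul_right
      (by rw [Nat.add_mul, Nat.one_mul, Nat.mul_comm q D]; exact h2)
  have hq : pvNb D (D * q) = q := by omega
  rw [hq, Nat.mul_comm]

lemma pvNb_lt_iff (D : Nat) (hD : 0 < D) (k M : Nat) : k < pvNb D M ↔ k * D < M := by
  rcases pvNb_bounds D hD M with ⟨h1, h2⟩
  constructor
  · intro hk
    have : (k + 1) * D ≤ pvNb D M * D := Nat.mul_le_mul_right D hk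
    have : k * D + D ≤ pvNb D M * D := by rw [Nat.add_mul] at this; omega
    omega
  · intro hk
    have : k * D < pvNb D M * D := by omega
    exact Nat.lt_of_mul_lt_mul_right this

lemma pvNb_mono (D : Nat) {a b : Nat} (h : a ≤ b) : pvNb D a ≤ pvNb D b := by
  induction h with
  | refl => exact Nat.le_refl _
  | step _ ih => exact Nat.le_trans ih (by simp only [pvNb]; split <;> omega)

lemma pvPositions_eq (d : Int) (hd : d ≠ 0) (M : Nat) :
    (PySem.List.pyRange 0 (M : Int) 1).filter (fun i => PySem.Int.mod i d == 0)
      = pvPos d.natAbs (pvNb d.natAbs M) := by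
  have hD : 0 < d.natAbs := Int.natAbs_pos.mpr hd
  induction M with
  | zero => simp [pvPos, pvNb, PySem.List.pyRange_one_eq_nil]
  | succ M ih =>
    have hcast : ((M + 1 : Nat) : Int) = (M : Int) + 1 := by push_cast; ring
    rw [hcast, PySem.List.pyRange_one_succ_right (by exact_mod_cast Nat.zero_le M),
      List.filter_append, ih]
    have hmod : (PySem.Int.mod (M : Int) d == 0) = decide (d.natAbs ∣ M) := by
      rcases Decidable.em (d.natAbs ∣ M) with h | h
      · have : d ∣ (M : Int) := Int.natAbs_dvd.mp (Int.natCast_dvd_natCast.mpr h)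
        simp [h, (PySem.Int.mod_eq_zero_iff_dvd (M : Int) d).mpr this]
      · have : ¬ d ∣ (M : Int) := fun hc =>
          h (Int.natCast_dvd_natCast.mp (Int.natAbs_dvd.mpr hc))
        have : PySem.Int.mod (M : Int) d ≠ 0 := fun hc =>
          this ((PySem.Int.mod_eq_zero_iff_dvd (M : Int) d).mp hc)
        simp [h, this]
    by_cases h : d.natAbs ∣ M
    · have hM : M = pvNb d.natAbs M * d.natAbs := pvNb_mul_of_dvd _ hD _ h
      have hnb : pvNb d.natAbs (M + 1) = pvNb d.natAbs M + 1 := by simp [pvNb, h]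
      rw [hnb]
      simp only [List.filter, hmod, h, decide_true, pvPos, List.range_succ, List.map_append,
        List.map_cons, List.map_nil]
      congr 2
      exact_mod_cast hM
    · have hnb : pvNb d.natAbs (M + 1) = pvNb d.natAbs M := by simp [pvNb, h]
      rw [hnb]
      simp [List.filter, hmod, h]

lemma pvContrib_nil (D : Nat) (iv : Bool) (r : List Int) (k : Nat) (h : r.length ≤ k * D) :
    pvContrib D iv r k = [] := by
  unfold pvContrib; rw [if_neg (by omega)]

lemma pvPad_length (m : Nat) (sd : List (List Int)) : (pvPad m sd).length = max sd.length m := by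
  unfold pvPad; simp; omega

lemma pvPad_getElem (m : Nat) (sd : List (List Int)) (j : Nat) (h : j < (pvPad m sd).length) :
    (pvPad m sd)[j] = if hj : j < sd.length then sd[j] else [] := by
  unfold pvPad at h ⊢
  rcases Decidable.em (j < sd.length) with hj | hj
  · simp [hj]
  · simp only [List.getElem_append, dif_neg hj]
    simp [List.getElem_replicate]

lemma pvEnum_append_singleton {α : Type} (xs : List α) (x : α) : ∀ s : Int,
    PySem.List.enumerate (xs ++ [x]) s = PySem.List.enumerate xs s ++ [(s + xs.length, x)] := by
  induction xs with
  | nil => intro s; simp [PySem.List.enumerate_cons, PySem.List.enumerate_nil]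
  | cons y ys ih =>
    intro s
    simp only [List.cons_append, PySem.List.enumerate_cons, ih (s + 1), List.length_cons]
    have he : s + 1 + (ys.length : Int) = s + ((ys.length + 1 : Nat) : Int) := by push_cast; ring
    rw [he]

lemma pvPos_length (D n : Nat) : (pvPos D n).length = n := by simp [pvPos]

lemma pvPos_getElem (D n j : Nat) (h : j < (pvPos D n).length) :
    (pvPos D n)[j] = ((j * D : Nat) : Int) := by
  simp [pvPos]

lemma pvEnum_pvPos (D n : Nat) :
    PySem.List.enumerate (pvPos D n) 0
      = (List.range n).map (fun k : Nat => ((k : Int), ((k * D : Nat) : Int))) := by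
  induction n with
  | zero => simp [pvPos, PySem.List.enumerate_nil]
  | succ n ih =>
    have h1 : pvPos D (n + 1) = pvPos D n ++ [((n * D : Nat) : Int)] := by
      simp [pvPos, List.range_succ]
    rw [h1, pvEnum_append_singleton, ih, List.range_succ, List.map_append]
    simp [pvPos_length]

lemma pvInnerB_aux (iv : Bool) (D : Nat) (run : List Int) (n : Nat)
    (hD : 0 < D) (hrun : run.length ≤ n * D) (sd : List (List Int)) (_hlen : sd.length = n) :
    ∀ m, m ≤ n →
      (((List.range m).map (fun k : Nat => ((k : Int), ((k * D : Nat) : Int)))).foldl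
          (pvBStep iv (pvPos D n) run) sd)
        = sd.mapIdx (fun k b => if k < m then b ++ pvContrib D iv run k else b) := by
  intro m
  induction m with
  | zero =>
    intro _
    apply List.ext_getElem (by simp)
    intro j h1 h2
    simp [List.getElem_mapIdx]
  | succ m ih =>
    intro hm
    rw [List.range_succ, List.map_append, List.foldl_append, ih (by omega)]
    simp only [List.map_cons, List.map_nil, List.foldl_cons, List.foldl_nil]
    unfold pvBStep
    simp only []
    by_cases hg : m * D < run.length
    · rw [if_pos (by exact_mod_cast hg : ((m * D : Nat) : Int) < (run.length : Int))]
      have hget : PySem.List.pyGetD run ((m * D : Nat) : Int) 0 = run.getD (m * D) 0 :=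
        PySem.List.pyGetD_natCast run (m * D) 0
      have hfun : (fun b : List Int =>
            if iv = true then
              (b ++ [PySem.List.pyGetD run ((m * D : Nat) : Int) 0]) ++
                PySem.List.slice run (some ((m * D : Nat) : Int))
                  (some (if (m : Int) + 1 < ((pvPos D n).length : Int)
                         then PySem.List.pyGetD (pvPos D n) ((m : Int) + 1) 0
                         else (run.length : Int)))
            else b ++ [PySem.List.pyGetD run ((m * D : Nat) : Int) 0])
          = (fun b => b ++ pvContrib D iv run m) := by
        funext b
        unfold pvContrib
        rw [if_pos hg, hget]
        rcases iv with _ | _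
        · simp
        · rw [if_pos rfl, if_pos rfl, pvPos_length]
          by_cases hmn : m + 1 < n
          · rw [if_pos (show (m : Int) + 1 < (n : Int) by exact_mod_cast hmn)]
            have hc : ((m : Int) + 1) = (((m + 1 : Nat)) : Int) := by push_cast; ring
            rw [hc, PySem.List.pyGetD_natCast,
              List.getD_eq_getElem _ _ (show m + 1 < (pvPos D n).length by
                rw [pvPos_length]; exact hmn),
              pvPos_getElem, PySem.List.slice_natCast]
            have hDd : (m + 1) * D - m * D = D := by rw [Nat.succ_mul]; omega
            rw [hDd]
            simp
          · rw [if_neg (show ¬ ((m : Int) + 1 < (n : Int)) by exact_mod_cast hmn),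
              PySem.List.slice_natCast]
            have hmn' : m + 1 = n := by omega
            have hnD : n * D = m * D + D := by rw [← hmn', Nat.succ_mul]
            rw [List.take_of_length_le (by simp), List.take_of_length_le (by simp; omega)]
            simp
      rw [hfun]
      apply List.ext_getElem (by simp)
      intro j h1 h2
      simp only [List.length_modify, List.length_mapIdx] at h1 h2
      rw [List.getElem_modify]
      simp only [Int.toNat_natCast, List.getElem_mapIdx]
      by_cases hj : m = j
      · subst hj
        simp
      · rw [if_neg hj]
        by_cases hjm : j < m
        · simp [hjm, Nat.lt_succ_of_lt hjm]
        · have hjm' : ¬ j < m + 1 := by omega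
          simp [hjm, hjm']
    · rw [if_neg (by exact_mod_cast hg : ¬ (((m * D : Nat) : Int) < (run.length : Int)))]
      apply List.ext_getElem (by simp)
      intro j h1 h2
      simp only [List.getElem_mapIdx]
      by_cases hjm : j < m
      · simp [hjm, Nat.lt_succ_of_lt hjm]
      · by_cases hjm' : j < m + 1
        · have hj : j = m := by omega
          subst hj
          simp [hjm', pvContrib_nil D iv run j (by omega)]
        · simp [hjm, hjm']

lemma pvInnerB (iv : Bool) (D : Nat) (run : List Int) (n : Nat)
    (hD : 0 < D) (hrun : run.length ≤ n * D) (sd : List (List Int)) (hlen : sd.length = n) :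
    (PySem.List.enumerate (pvPos D n) 0).foldl (pvBStep iv (pvPos D n) run) sd
      = sd.mapIdx (fun k b => b ++ pvContrib D iv run k) := by
  rw [pvEnum_pvPos, pvInnerB_aux iv D run n hD hrun sd hlen n (Nat.le_refl n)]
  apply List.ext_getElem (by simp)
  intro j h1 h2
  simp only [List.length_mapIdx] at h1 h2
  simp only [List.getElem_mapIdx]
  rw [if_pos (by omega)]

lemma pvOuterB (iv : Bool) (D : Nat) (n : Nat) (hD : 0 < D) :
    ∀ (runs : List (List Int)) (sd : List (List Int)), sd.length = n →
      (∀ r ∈ runs, r.length ≤ n * D) →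
      runs.foldl
          (fun sd run => (PySem.List.enumerate (pvPos D n) 0).foldl (pvBStep iv (pvPos D n) run) sd)
          sd
        = sd.mapIdx (fun k b => b ++ (runs.map (fun r => pvContrib D iv r k)).flatten) := by
  intro runs
  induction runs with
  | nil =>
    intro sd hlen _
    apply List.ext_getElem (by simp)
    intro j h1 h2
    simp [List.getElem_mapIdx]
  | cons r rs ih =>
    intro sd hlen hall
    simp only [List.foldl_cons]
    rw [pvInnerB iv D r n hD (hall r List.mem_cons_self) sd hlen]
    rw [ih _ (by simp [hlen]) (fun r' hr' => hall r' (List.mem_cons_of_mem r hr'))]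
    apply List.ext_getElem (by simp)
    intro j h1 h2
    simp [List.getElem_mapIdx]

lemma pvContribP_zero (D : Nat) (iv : Bool) (run : List Int) (k : Nat) :
    pvContribP D iv run k 0 = [] := by
  unfold pvContribP; rw [if_neg (by omega)]

lemma pvContribP_last (D : Nat) (iv : Bool) (run : List Int) (k : Nat) :
    pvContribP D iv run k run.length = pvContrib D iv run k := by
  unfold pvContribP pvContrib
  by_cases h : k * D < run.length
  · rw [if_pos h, if_pos h]
    rcases iv with _ | _
    · rfl
    · have hl : (run.drop (k * D)).length = run.length - k * D := by simp
      rw [← List.take_take, List.take_of_length_le (le_of_eq hl)]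
  · rw [if_neg h, if_neg h]

lemma pvContribP_stable (D : Nat) (iv : Bool) (run : List Int) (k t : Nat) (hD : 0 < D)
    (h : (k + 1) * D ≤ t ∨ t + 1 ≤ k * D) :
    pvContribP D iv run k (t + 1) = pvContribP D iv run k t := by
  unfold pvContribP
  have hsm : (k + 1) * D = k * D + D := Nat.succ_mul k D
  rcases h with h | h
  · rw [if_pos (show k * D < t + 1 by omega), if_pos (show k * D < t by omega)]
    rcases iv with _ | _
    · rfl
    · have h1 : min D (t + 1 - k * D) = D := by omega
      have h2 : min D (t - k * D) = D := by omega
      rw [h1, h2]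
  · rw [if_neg (show ¬ k * D < t + 1 by omega), if_neg (show ¬ k * D < t by omega)]

lemma pvContribP_extend (D : Nat) (run : List Int) (k t : Nat)
    (hkt : k * D < t) (hlt : t < (k + 1) * D) (hlen : t < run.length) :
    pvContribP D true run k (t + 1) = pvContribP D true run k t ++ [run.getD t 0] := by
  unfold pvContribP
  rw [if_pos (by omega), if_pos hkt]
  have hsm : (k + 1) * D = k * D + D := Nat.succ_mul k D
  have h1 : min D (t + 1 - k * D) = t + 1 - k * D := by omega
  have h2 : min D (t - k * D) = t - k * D := by omega
  rw [h1, h2]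
  have h3 : t + 1 - k * D = (t - k * D) + 1 := by omega
  rw [h3, List.take_add_one]
  have h4 : (run.drop (k * D))[t - k * D]? = some (run.getD t 0) := by
    rw [List.getElem?_drop]
    have : k * D + (t - k * D) = t := by omega
    rw [this, List.getElem?_eq_getElem hlen, List.getD_eq_getElem _ _ hlen]
  rw [h4]
  simp

lemma pvContribP_new (D : Nat) (iv : Bool) (run : List Int) (k t : Nat)
    (hD : 0 < D) (hlen : t < run.length) (hkD : k * D = t) :
    pvContribP D iv run k (t + 1) = [run.getD t 0] ++ (if iv then [run.getD t 0] else []) := by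
  unfold pvContribP
  rw [if_pos (by omega), hkD]
  congr 1
  rcases iv with _ | _
  · rfl
  · 
    have h1 : min D (t + 1 - t) = 1 := by omega
    rw [h1]
    have h2 : (0 : Nat) + 1 = 1 := rfl
    rw [← h2, List.take_add_one]
    have h4 : (run.drop t)[0]? = some (run.getD t 0) := by
      rw [List.getElem?_drop]
      have : t + 0 = t := by omega
      rw [this, List.getElem?_eq_getElem hlen, List.getD_eq_getElem _ _ hlen]
    rw [h4]
    simp

lemma pvContribP_false_succ (D : Nat) (run : List Int) (k t : Nat) (h : k * D ≠ t) :
    pvContribP D false run k (t + 1) = pvContribP D false run k t := by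
  unfold pvContribP
  by_cases hk : k * D < t
  · rw [if_pos (by omega), if_pos hk]
    rfl
  · rw [if_neg (by omega), if_neg hk]

lemma pvInnerA (d : Int) (hd : d ≠ 0) (iv : Bool) (run : List Int) :
    ∀ (t : Nat), t ≤ run.length → ∀ (sd0 : List (List Int)) (pos0 : List Int),
      pos0 = pvPos d.natAbs sd0.length →
      (PySem.List.pyRange 0 (t : Int) 1).foldl (pvAStep d iv run) ((sd0, pos0), 0)
        = (((pvPad (max sd0.length (pvNb d.natAbs t)) sd0).mapIdx
              (fun k b => b ++ pvContribP d.natAbs iv run k t),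
            pvPos d.natAbs (max sd0.length (pvNb d.natAbs t))),
           ((pvNb d.natAbs t : Nat) : Int)) := by
  have hD : 0 < d.natAbs := Int.natAbs_pos.mpr hd
  intro t
  induction t with
  | zero =>
    intro _ sd0 pos0 hpos
    rw [show ((0 : Nat) : Int) = 0 by simp, PySem.List.pyRange_one_eq_nil (le_refl 0)]
    simp only [List.foldl_nil]
    have h0 : pvNb d.natAbs 0 = 0 := rfl
    rw [h0, Nat.max_zero]
    have hsd : (pvPad sd0.length sd0).mapIdx
        (fun k b => b ++ pvContribP d.natAbs iv run k 0) = sd0 := by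
      apply List.ext_getElem (by simp [pvPad_length])
      intro j h1 h2
      simp only [List.getElem_mapIdx, pvContribP_zero, List.append_nil]
      rw [pvPad_getElem sd0.length sd0 j (by simp [pvPad_length]; omega)]
      simp [h2]
    rw [hsd, hpos]
    rfl
  | succ t ih =>
    intro ht sd0 pos0 hpos
    have hcast : ((t + 1 : Nat) : Int) = (t : Int) + 1 := by push_cast; ring
    rw [hcast, PySem.List.pyRange_one_succ_right (by exact_mod_cast Nat.zero_le t),
      List.foldl_append, ih (by omega) sd0 pos0 hpos]
    simp only [List.foldl_cons, List.foldl_nil]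
    have hget : PySem.List.pyGetD run ((t : Nat) : Int) 0 = run.getD t 0 :=
      PySem.List.pyGetD_natCast run t 0
    have hlt : t < run.length := by omega
    have hBlen : ((pvPad (max sd0.length (pvNb d.natAbs t)) sd0).mapIdx
        (fun k b => b ++ pvContribP d.natAbs iv run k t)).length
        = max sd0.length (pvNb d.natAbs t) := by
      simp only [List.length_mapIdx, pvPad_length]
      omega
    rcases pvNb_bounds d.natAbs hD t with ⟨hb1, hb2⟩
    unfold pvAStep
    simp only [hget]
    by_cases hdvd : d.natAbs ∣ t
    · have hmod : PySem.Int.mod (t : Int) d = 0 :=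
        (PySem.Int.mod_eq_zero_iff_dvd _ _).mpr (Int.natAbs_dvd.mp (Int.natCast_dvd_natCast.mpr hdvd))
      rw [if_pos hmod]
      have ht' : t = pvNb d.natAbs t * d.natAbs := pvNb_mul_of_dvd _ hD t hdvd
      have hnb1 : pvNb d.natAbs (t + 1) = pvNb d.natAbs t + 1 := by simp [pvNb, hdvd]
      have hsc : ((pvNb d.natAbs t : Nat) : Int) + 1 = ((pvNb d.natAbs (t + 1) : Nat) : Int) := by
        rw [hnb1]; push_cast; ring
      have hstable : ∀ j, j < pvNb d.natAbs t →
          pvContribP d.natAbs iv run j (t + 1) = pvContribP d.natAbs iv run j t := by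
        intro j hj
        refine pvContribP_stable _ _ _ _ _ hD (Or.inl ?_)
        calc (j + 1) * d.natAbs ≤ pvNb d.natAbs t * d.natAbs := Nat.mul_le_mul_right _ hj
          _ = t := ht'.symm
      by_cases hgrow : sd0.length ≤ pvNb d.natAbs t
      · -- a new bucket is appended
        have hKeq : max sd0.length (pvNb d.natAbs t) = pvNb d.natAbs t := by omega
        have hK'eq : max sd0.length (pvNb d.natAbs (t + 1)) = pvNb d.natAbs t + 1 := by
          rw [hnb1]; omega
        have hc : (((pvPad (max sd0.length (pvNb d.natAbs t)) sd0).mapIdx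
            (fun k b => b ++ pvContribP d.natAbs iv run k t)).length : Int)
            ≤ ((pvNb d.natAbs t : Nat) : Int) := by
          rw [hBlen, hKeq]
        simp only [if_pos hc, Int.toNat_natCast]
        have hpos' : pvPos d.natAbs (max sd0.length (pvNb d.natAbs t)) ++ [(t : Int)]
            = pvPos d.natAbs (max sd0.length (pvNb d.natAbs (t + 1))) := by
          rw [hKeq, hK'eq]
          simp only [pvPos, List.range_succ, List.map_append, List.map_cons, List.map_nil]
          rw [show ((t : Nat) : Int) = ((pvNb d.natAbs t * d.natAbs : Nat) : Int) from by
            exact_mod_cast congrArg (fun x : Nat => (x : Int)) ht']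
        rcases iv with _ | _
        · rw [if_neg Bool.false_ne_true]
          simp only [Prod.mk.injEq]
          refine ⟨⟨?_, hpos'⟩, hsc⟩
          apply List.ext_getElem (by
            simp only [List.length_modify, List.length_append, List.length_mapIdx,
              pvPad_length, List.length_cons, List.length_nil]
            omega)
          intro j h1 h2
          simp only [List.length_modify, List.length_append, List.length_mapIdx,
            pvPad_length, List.length_cons, List.length_nil] at h1 h2
          rw [List.getElem_modify]
          by_cases hj : pvNb d.natAbs t = j
          · subst hj
            rw [if_pos rfl]
            rw [List.getElem_append_right (by
              simp only [List.length_mapIdx, pvPad_length]; omega)]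
            rw [List.getElem_singleton]
            simp only [List.getElem_mapIdx]
            rw [pvPad_getElem (max sd0.length (pvNb d.natAbs (t + 1))) sd0 _ (by
              simp only [pvPad_length]; omega)]
            rw [dif_neg (by omega)]
            rw [pvContribP_new d.natAbs false run _ t hD hlt ht'.symm]
            simp
          · rw [if_neg hj]
            have hjlt : j < pvNb d.natAbs t := by omega
            rw [List.getElem_append_left (by
              simp only [List.length_mapIdx, pvPad_length]; omega)]
            simp only [List.getElem_mapIdx]
            rw [pvPad_getElem (max sd0.length (pvNb d.natAbs t)) sd0 j (by
              simp only [pvPad_length]; omega),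
              pvPad_getElem (max sd0.length (pvNb d.natAbs (t + 1))) sd0 j (by
              simp only [pvPad_length]; omega)]
            rw [hstable j hjlt]
        · rw [if_pos rfl]
          have hidx : (((pvNb d.natAbs t : Nat) : Int) + 1 - 1).toNat = pvNb d.natAbs t := by
            simp
          rw [hidx]
          simp only [Prod.mk.injEq]
          refine ⟨⟨?_, hpos'⟩, hsc⟩
          apply List.ext_getElem (by
            simp only [List.length_modify, List.length_append, List.length_mapIdx,
              pvPad_length, List.length_cons, List.length_nil]
            omega)
          intro j h1 h2
          simp only [List.length_modify, List.length_append, List.length_mapIdx,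
            pvPad_length, List.length_cons, List.length_nil] at h1 h2
          rw [List.getElem_modify, List.getElem_modify]
          by_cases hj : pvNb d.natAbs t = j
          · subst hj
            rw [if_pos rfl, if_pos rfl]
            rw [List.getElem_append_right (by
              simp only [List.length_mapIdx, pvPad_length]; omega)]
            rw [List.getElem_singleton]
            simp only [List.getElem_mapIdx]
            rw [pvPad_getElem (max sd0.length (pvNb d.natAbs (t + 1))) sd0 _ (by
              simp only [pvPad_length]; omega)]
            rw [dif_neg (by omega)]
            rw [pvContribP_new d.natAbs true run _ t hD hlt ht'.symm]
            simp
          · rw [if_neg hj, if_neg hj]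
            have hjlt : j < pvNb d.natAbs t := by omega
            rw [List.getElem_append_left (by
              simp only [List.length_mapIdx, pvPad_length]; omega)]
            simp only [List.getElem_mapIdx]
            rw [pvPad_getElem (max sd0.length (pvNb d.natAbs t)) sd0 j (by
              simp only [pvPad_length]; omega),
              pvPad_getElem (max sd0.length (pvNb d.natAbs (t + 1))) sd0 j (by
              simp only [pvPad_length]; omega)]
            rw [hstable j hjlt]
      · -- no growth: the bucket already exists
        have hngrow : pvNb d.natAbs t < sd0.length := by omega
        have hKeq : max sd0.length (pvNb d.natAbs t) = sd0.length := by omega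
        have hK'eq : max sd0.length (pvNb d.natAbs (t + 1)) = sd0.length := by
          rw [hnb1]; omega
        have hc : ¬ ((((pvPad (max sd0.length (pvNb d.natAbs t)) sd0).mapIdx
            (fun k b => b ++ pvContribP d.natAbs iv run k t)).length : Int)
            ≤ ((pvNb d.natAbs t : Nat) : Int)) := by
          rw [hBlen, hKeq]
          exact_mod_cast Nat.not_le.mpr hngrow
        simp only [if_neg hc, Int.toNat_natCast]
        have hcur : pvContribP d.natAbs iv run (pvNb d.natAbs t) t = [] := by
          unfold pvContribP
          rw [if_neg (by omega)]
        have hstable2 : ∀ j, j ≠ pvNb d.natAbs t →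
            pvContribP d.natAbs iv run j (t + 1) = pvContribP d.natAbs iv run j t := by
          intro j hj
          rcases Nat.lt_or_ge j (pvNb d.natAbs t) with hlt' | hge
          · exact hstable j hlt'
          · refine pvContribP_stable _ _ _ _ _ hD (Or.inr ?_)
            have h4 : (pvNb d.natAbs t + 1) * d.natAbs ≤ j * d.natAbs :=
              Nat.mul_le_mul_right _ (by omega)
            have h5 : (pvNb d.natAbs t + 1) * d.natAbs = pvNb d.natAbs t * d.natAbs + d.natAbs :=
              Nat.succ_mul _ _
            omega
        have hnew := pvContribP_new d.natAbs iv run (pvNb d.natAbs t) t hD hlt ht'.symm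
        rcases iv with _ | _
        · rw [if_neg Bool.false_ne_true]
          simp only [Prod.mk.injEq]
          refine ⟨⟨?_, by rw [hKeq, hK'eq]⟩, hsc⟩
          apply List.ext_getElem (by
            simp only [List.length_modify, List.length_mapIdx, pvPad_length]; omega)
          intro j h1 h2
          simp only [List.length_modify, List.length_mapIdx, pvPad_length] at h1 h2
          rw [List.getElem_modify]
          simp only [List.getElem_mapIdx]
          by_cases hj : pvNb d.natAbs t = j
          · subst hj
            rw [if_pos rfl]
            rw [pvPad_getElem (max sd0.length (pvNb d.natAbs t)) sd0 _ (by
              simp only [pvPad_length]; omega),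
              pvPad_getElem (max sd0.length (pvNb d.natAbs (t + 1))) sd0 _ (by
              simp only [pvPad_length]; omega)]
            rw [hcur, hnew]
            simp
          · rw [if_neg hj]
            rw [pvPad_getElem (max sd0.length (pvNb d.natAbs t)) sd0 j (by
              simp only [pvPad_length]; omega),
              pvPad_getElem (max sd0.length (pvNb d.natAbs (t + 1))) sd0 j (by
              simp only [pvPad_length]; omega)]
            rw [hstable2 j (fun hh => hj hh.symm)]
        · rw [if_pos rfl]
          have hidx : (((pvNb d.natAbs t : Nat) : Int) + 1 - 1).toNat = pvNb d.natAbs t := by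
            simp
          rw [hidx]
          simp only [Prod.mk.injEq]
          refine ⟨⟨?_, by rw [hKeq, hK'eq]⟩, hsc⟩
          apply List.ext_getElem (by
            simp only [List.length_modify, List.length_mapIdx, pvPad_length]; omega)
          intro j h1 h2
          simp only [List.length_modify, List.length_mapIdx, pvPad_length] at h1 h2
          rw [List.getElem_modify, List.getElem_modify]
          simp only [List.getElem_mapIdx]
          by_cases hj : pvNb d.natAbs t = j
          · subst hj
            rw [if_pos rfl, if_pos rfl]
            rw [pvPad_getElem (max sd0.length (pvNb d.natAbs t)) sd0 _ (by
              simp only [pvPad_length]; omega),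
              pvPad_getElem (max sd0.length (pvNb d.natAbs (t + 1))) sd0 _ (by
              simp only [pvPad_length]; omega)]
            rw [hcur, hnew]
            simp
          · rw [if_neg hj, if_neg hj]
            rw [pvPad_getElem (max sd0.length (pvNb d.natAbs t)) sd0 j (by
              simp only [pvPad_length]; omega),
              pvPad_getElem (max sd0.length (pvNb d.natAbs (t + 1))) sd0 j (by
              simp only [pvPad_length]; omega)]
            rw [hstable2 j (fun hh => hj hh.symm)]
    · -- not a sampled step
      have hmodne : ¬ PySem.Int.mod (t : Int) d = 0 := fun hc =>
        hdvd (Int.natCast_dvd_natCast.mp (Int.natAbs_dvd.mpr ((PySem.Int.mod_eq_zero_iff_dvd _ _).mp hc)))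
      rw [if_neg hmodne]
      have hnb1 : pvNb d.natAbs (t + 1) = pvNb d.natAbs t := by simp [pvNb, hdvd]
      have ht0 : 0 < t := Nat.pos_of_ne_zero (fun h0 => hdvd (h0 ▸ dvd_zero _))
      have h1nb : 1 ≤ pvNb d.natAbs t := (pvNb_lt_iff d.natAbs hD 0 t).mpr (by omega)
      have htlt : t < pvNb d.natAbs t * d.natAbs := by
        rcases Nat.lt_or_ge t (pvNb d.natAbs t * d.natAbs) with h' | h'
        · exact h'
        · exfalso
          have heq : t = pvNb d.natAbs t * d.natAbs := by omega
          exact hdvd ⟨pvNb d.natAbs t, heq.trans (Nat.mul_comm _ _)⟩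
      have hsub : (pvNb d.natAbs t - 1) * d.natAbs = pvNb d.natAbs t * d.natAbs - d.natAbs :=
        Nat.sub_one_mul _ _
      have hstable3 : ∀ j, j ≠ pvNb d.natAbs t - 1 →
          pvContribP d.natAbs iv run j (t + 1) = pvContribP d.natAbs iv run j t := by
        intro j hj
        rcases Nat.lt_or_ge j (pvNb d.natAbs t - 1) with hlt' | hge
        · refine pvContribP_stable _ _ _ _ _ hD (Or.inl ?_)
          have : (j + 1) * d.natAbs ≤ (pvNb d.natAbs t - 1) * d.natAbs :=
            Nat.mul_le_mul_right _ (by omega)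
          omega
        · refine pvContribP_stable _ _ _ _ _ hD (Or.inr ?_)
          have : pvNb d.natAbs t * d.natAbs ≤ j * d.natAbs :=
            Nat.mul_le_mul_right _ (by omega)
          omega
      rcases iv with _ | _
      · rw [if_neg Bool.false_ne_true]
        rw [hnb1]
        simp only [Prod.mk.injEq]
        refine ⟨⟨?_, by trivial⟩, by trivial⟩
        apply List.ext_getElem (by simp)
        intro j h1 h2
        simp only [List.getElem_mapIdx]
        have hjD : j * d.natAbs ≠ t := fun hh =>
          hdvd (hh ▸ ⟨j, Nat.mul_comm j d.natAbs⟩)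
        rw [pvContribP_false_succ d.natAbs run j t hjD]
      · rw [if_pos rfl]
        have hidx : (((pvNb d.natAbs t : Nat) : Int) - 1).toNat = pvNb d.natAbs t - 1 := by
          omega
        rw [hidx, hnb1]
        simp only [Prod.mk.injEq]
        refine ⟨⟨?_, by trivial⟩, by trivial⟩
        apply List.ext_getElem (by simp)
        intro j h1 h2
        simp only [List.length_modify, List.length_mapIdx, pvPad_length] at h1 h2
        rw [List.getElem_modify]
        simp only [List.getElem_mapIdx]
        by_cases hj : pvNb d.natAbs t - 1 = j
        · subst hj
          rw [if_pos rfl]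
          rw [pvContribP_extend d.natAbs run _ t (by omega) (by
              have h6 : (pvNb d.natAbs t - 1 + 1) * d.natAbs = pvNb d.natAbs t * d.natAbs := by
                congr 1; omega
              omega) hlt]
          simp
        · rw [if_neg hj]
          rw [hstable3 j (fun hh => hj hh.symm)]

lemma pvFoldlMax (l : List (List Int)) : ∀ a : Nat,
    l.foldl (fun m r => max m r.length) a = max a (pvMaxLen l) := by
  induction l with
  | nil => intro a; simp [pvMaxLen]
  | cons r rs ih =>
    intro a
    have h1 : pvMaxLen (r :: rs) = rs.foldl (fun m r => max m r.length) (max 0 r.length) := rfl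
    simp only [List.foldl_cons]
    rw [ih, h1, ih (max 0 r.length)]
    omega

lemma pvMaxLen_cons (r : List Int) (rs : List (List Int)) :
    pvMaxLen (r :: rs) = max r.length (pvMaxLen rs) := by
  have h1 : pvMaxLen (r :: rs) = rs.foldl (fun m r => max m r.length) (max 0 r.length) := rfl
  rw [h1, pvFoldlMax]
  omega

lemma pvMaxLen_ge (runs : List (List Int)) : ∀ r ∈ runs, r.length ≤ pvMaxLen runs := by
  induction runs with
  | nil => intro r hr; cases hr
  | cons x xs ih =>
    intro r hr
    rw [pvMaxLen_cons]
    rcases List.mem_cons.mp hr with h | h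
    · subst h; omega
    · have := ih r h; omega

lemma pvOuterA (d : Int) (hd : d ≠ 0) (iv : Bool) :
    ∀ (runs : List (List Int)) (sd0 : List (List Int)) (pos0 : List Int),
      pos0 = pvPos d.natAbs sd0.length →
      runs.foldl (fun acc runData =>
          ((PySem.List.pyRange 0 (runData.length : Int) 1).foldl (pvAStep d iv runData) (acc, 0)).1)
        (sd0, pos0)
      = ((pvPad (max sd0.length (pvNb d.natAbs (pvMaxLen runs))) sd0).mapIdx
            (fun k b => b ++ (runs.map (fun r => pvContrib d.natAbs iv r k)).flatten),
         pvPos d.natAbs (max sd0.length (pvNb d.natAbs (pvMaxLen runs)))) := by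
  have hD : 0 < d.natAbs := Int.natAbs_pos.mpr hd
  intro runs
  induction runs with
  | nil =>
    intro sd0 pos0 hpos
    have h0 : pvMaxLen ([] : List (List Int)) = 0 := rfl
    rw [List.foldl_nil, h0]
    have h1 : pvNb d.natAbs 0 = 0 := rfl
    rw [h1, Nat.max_zero, hpos]
    simp only [Prod.mk.injEq]
    refine ⟨?_, by trivial⟩
    apply List.ext_getElem (by simp [pvPad_length])
    intro j h1 h2
    simp only [List.getElem_mapIdx, List.map_nil, List.flatten_nil, List.append_nil]
    rw [pvPad_getElem sd0.length sd0 j (by simp [pvPad_length]; omega)]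
    simp [h1]
  | cons r rs ih =>
    intro sd0 pos0 hpos
    simp only [List.foldl_cons]
    rw [pvInnerA d hd iv r r.length (Nat.le_refl _) sd0 pos0 hpos]
    simp only [pvContribP_last]
    have hB1len : ((pvPad (max sd0.length (pvNb d.natAbs r.length)) sd0).mapIdx
        (fun k b => b ++ pvContrib d.natAbs iv r k)).length
        = max sd0.length (pvNb d.natAbs r.length) := by
      simp only [List.length_mapIdx, pvPad_length]
      omega
    rw [ih _ _ (by rw [hB1len])]
    rw [hB1len]
    rcases pvNb_bounds d.natAbs hD r.length with ⟨ha1, ha2⟩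
    have hKtot : max (max sd0.length (pvNb d.natAbs r.length)) (pvNb d.natAbs (pvMaxLen rs))
        = max sd0.length (pvNb d.natAbs (pvMaxLen (r :: rs))) := by
      rw [pvMaxLen_cons]
      have m1 := pvNb_mono d.natAbs (le_max_left r.length (pvMaxLen rs))
      have m2 := pvNb_mono d.natAbs (le_max_right r.length (pvMaxLen rs))
      have m3 : pvNb d.natAbs (max r.length (pvMaxLen rs)) = pvNb d.natAbs r.length
          ∨ pvNb d.natAbs (max r.length (pvMaxLen rs)) = pvNb d.natAbs (pvMaxLen rs) := by
        rcases Nat.le_total r.length (pvMaxLen rs) with h' | h'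
        · right; rw [Nat.max_eq_right h']
        · left; rw [Nat.max_eq_left h']
      rcases m3 with m3 | m3 <;> omega
    rw [hKtot]
    simp only [Prod.mk.injEq]
    refine ⟨?_, by trivial⟩
    have hpadsplit : pvPad (max sd0.length (pvNb d.natAbs (pvMaxLen (r :: rs))))
        ((pvPad (max sd0.length (pvNb d.natAbs r.length)) sd0).mapIdx
          (fun k b => b ++ pvContrib d.natAbs iv r k))
        = ((pvPad (max sd0.length (pvNb d.natAbs r.length)) sd0).mapIdx
            (fun k b => b ++ pvContrib d.natAbs iv r k))
          ++ List.replicate (max sd0.length (pvNb d.natAbs (pvMaxLen (r :: rs)))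
              - ((pvPad (max sd0.length (pvNb d.natAbs r.length)) sd0).mapIdx
                  (fun k b => b ++ pvContrib d.natAbs iv r k)).length) [] := rfl
    rw [hpadsplit]
    apply List.ext_getElem (by
      simp only [List.length_mapIdx, List.length_append, List.length_replicate, pvPad_length]
      omega)
    intro j h1 h2
    simp only [List.length_mapIdx, List.length_append, List.length_replicate,
      pvPad_length] at h1 h2
    simp only [List.getElem_mapIdx, List.map_cons, List.flatten_cons]
    by_cases hj : j < max sd0.length (pvNb d.natAbs r.length)
    · rw [List.getElem_append_left (by rw [hB1len]; exact hj)]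
      simp only [List.getElem_mapIdx]
      rw [pvPad_getElem (max sd0.length (pvNb d.natAbs r.length)) sd0 j (by
          simp only [pvPad_length]; omega),
        pvPad_getElem (max sd0.length (pvNb d.natAbs (pvMaxLen (r :: rs)))) sd0 j (by
          simp only [pvPad_length]; omega)]
      by_cases hj0 : j < sd0.length
      · rw [dif_pos hj0]
        simp [List.append_assoc]
      · rw [dif_neg hj0]
        simp
    · rw [List.getElem_append_right (by rw [hB1len]; omega)]
      rw [List.getElem_replicate]
      rw [pvPad_getElem (max sd0.length (pvNb d.natAbs (pvMaxLen (r :: rs)))) sd0 j (by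
          simp only [pvPad_length]; omega)]
      rw [dif_neg (by omega)]
      have hcontrib : pvContrib d.natAbs iv r j = [] := by
        apply pvContrib_nil
        have h6 : pvNb d.natAbs r.length * d.natAbs ≤ j * d.natAbs :=
          Nat.mul_le_mul_right _ (by omega)
        omega
      rw [hcontrib]
      simp

lemma pvA_allEmpty (d : Int) (iv : Bool) (runs : List (List Int)) (h : ∀ r ∈ runs, r = []) :
    transferTimeDataToRunSetData runs d iv = ([], []) := by
  unfold transferTimeDataToRunSetData
  have hgen : ∀ acc : List (List Int) × List Int,
      runs.foldl (fun acc runData =>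
        ((PySem.List.pyRange 0 (runData.length : Int) 1).foldl (pvAStep d iv runData) (acc, 0)).1)
        acc = acc := by
    induction runs with
    | nil => intro acc; rfl
    | cons r rs ih =>
      intro acc
      have hr : r = [] := h r List.mem_cons_self
      subst hr
      simp only [List.foldl_cons, List.length_nil, Nat.cast_zero,
        PySem.List.pyRange_one_eq_nil (le_refl 0), List.foldl_nil]
      exact ih (fun r hr => h r (List.mem_cons_of_mem _ hr)) acc
  exact hgen ([], [])

lemma pvB_allEmpty (d : Int) (iv : Bool) (runs : List (List Int)) (h : ∀ r ∈ runs, r = []) :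
    transferTimeDataToRunSetData_alt runs d iv = ([], []) := by
  unfold transferTimeDataToRunSetData_alt
  have hmax : runs.foldl (fun m r => max m r.length) 0 = 0 := by
    rw [pvFoldlMax]
    have : pvMaxLen runs = 0 := by
      induction runs with
      | nil => rfl
      | cons r rs ih =>
        rw [pvMaxLen_cons]
        have hr : r = [] := h r List.mem_cons_self
        subst hr
        have := ih (fun r hr => h r (List.mem_cons_of_mem _ hr))
        simp [this]
    simp [this]
  rw [hmax]
  simp only [Nat.cast_zero, PySem.List.pyRange_one_eq_nil (le_refl 0), List.filter_nil,
    List.map_nil]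
  have hfix : ∀ (l : List (List Int)), l.foldl (fun sd run =>
      (PySem.List.enumerate ([] : List Int) 0).foldl (pvBStep iv [] run) sd)
      ([] : List (List Int)) = [] := by
    intro l
    induction l with
    | nil => rfl
    | cons r rs ih =>
      simpa only [List.foldl_cons, PySem.List.enumerate_nil, List.foldl_nil] using ih
  rw [hfix runs]

-- ===== VERDICT (by name: the statement is the Claim_ definition above) =====
theorem transferTimeDataToRunSetData_spec : Claim_equal_transferTimeDataToRunSetData := by
  intro runs d iv _ hpre
  unfold Spec_transferTimeDataToRunSetData
  by_cases hd : d = 0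
  · have hempty : ∀ r ∈ runs, r = [] := by
      rcases hpre with hpre | hpre
      · exact absurd hd hpre
      · exact hpre
    rw [pvA_allEmpty d iv runs hempty, pvB_allEmpty d iv runs hempty]
  · have hD : 0 < d.natAbs := Int.natAbs_pos.mpr hd
    unfold transferTimeDataToRunSetData
    rw [pvOuterA d hd iv runs [] [] (by simp [pvPos])]
    simp only [transferTimeDataToRunSetData_alt]
    have hmax : runs.foldl (fun m r => max m r.length) 0 = pvMaxLen runs := rfl
    rw [hmax, pvPositions_eq d hd (pvMaxLen runs)]
    rcases pvNb_bounds d.natAbs hD (pvMaxLen runs) with ⟨hm1, hm2⟩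
    have hall : ∀ r ∈ runs, r.length ≤ pvNb d.natAbs (pvMaxLen runs) * d.natAbs := by
      intro r hr
      have := pvMaxLen_ge runs r hr
      omega
    rw [pvOuterB iv d.natAbs (pvNb d.natAbs (pvMaxLen runs)) hD runs
      ((pvPos d.natAbs (pvNb d.natAbs (pvMaxLen runs))).map (fun _ => []))
      (by simp [pvPos_length]) hall]
    simp only [List.length_nil, Nat.zero_max]
    simp only [Prod.mk.injEq]
    refine ⟨?_, by trivial⟩
    apply List.ext_getElem (by simp [pvPad_length, pvPos_length])
    intro j h1 h2
    simp only [List.length_mapIdx, pvPad_length, List.length_map, pvPos_length] at h1 h2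
    simp only [List.getElem_mapIdx, List.getElem_map]
    have hpadnil : (pvPad (pvNb d.natAbs (pvMaxLen runs)) ([] : List (List Int)))[j]'(by
        simp only [pvPad_length]; omega) = ([] : List Int) := by
      rw [pvPad_getElem (pvNb d.natAbs (pvMaxLen runs)) [] j (by
        simp only [pvPad_length]; omega)]
      rw [dif_neg (by simp)]
    rw [hpadnil]
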